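-- pv_equiv track=rewrite | github.com/sarcXD/codeTest | calculator.py | handleMinusRepeats
-- ===== SOURCE A (Python) =====
-- def handleMinusRepeats(expr):
--     mult = ''
--     formatExp = ''
--     for ind in expr:
--         if ind == '-':
--             mult = '-' if mult is not '-' else ''
--         else:
--             formatExp += mult+ind
--             mult = ''
--     return formatExp
-- ===== SOURCE B (Python) =====
-- def handleMinusRepeats(expr):
--     # Run-based rewrite: scan maximal runs; a minus-run sets a pending sign by
--     # parity, a non-minus run is emitted prefixed by the pending sign.
--     out = []
--     pending = ''
--     i = 0
--     n = len(expr)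
--     while i < n:
--         j = i
--         if expr[i] == '-':
--             while j < n and expr[j] == '-':
--                 j += 1
--             pending = '-' if (j - i) % 2 == 1 else ''
--         else:
--             while j < n and expr[j] != '-':
--                 j += 1
--             out.append(pending + expr[i:j])
--             pending = ''
--         i = j
--     return ''.join(out)
-- ===== Notes on version B (the rewrite author's own statement) =====
-- stated objective: alternative
-- what changed: B scans maximal runs with an index/while loop (parity of each minus-run sets a pending sign, each non-minus run is emitted once via a slice and joined at the end) instead of A's per-character state machine with string concatenation.
import Mathlib
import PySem

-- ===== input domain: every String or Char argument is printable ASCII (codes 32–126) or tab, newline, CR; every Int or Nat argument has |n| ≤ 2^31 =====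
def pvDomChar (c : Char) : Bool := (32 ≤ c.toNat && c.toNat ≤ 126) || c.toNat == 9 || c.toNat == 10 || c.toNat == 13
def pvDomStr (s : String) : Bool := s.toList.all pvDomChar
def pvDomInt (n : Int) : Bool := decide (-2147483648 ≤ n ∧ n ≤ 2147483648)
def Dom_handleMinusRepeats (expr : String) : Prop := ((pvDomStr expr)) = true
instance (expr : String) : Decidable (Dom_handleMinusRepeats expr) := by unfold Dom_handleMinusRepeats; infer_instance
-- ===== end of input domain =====

-- B rewrites A's per-character sign state machine as a run-based scan (the parity of each
-- minus-run becomes a pending sign, non-minus runs are emitted whole and joined); alternative, not faster.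

-- ===== PORT A =====
-- A: fold over the characters with state (mult, formatExp); '-' toggles mult, any other
-- character appends mult+char and resets mult.
def handleMinusRepeats (expr : String) : String :=
  (expr.toList.foldl
    (fun (st : String × String) ind =>
      if ind == '-' then
        (if st.1 ≠ "-" then "-" else "", st.2)
      else
        ("", st.2 ++ st.1 ++ String.singleton ind))
    ("", "")).2

-- ===== PORT B =====
-- B: consume one maximal run per step (takeWhile/dropWhile = Source B's inner while loops),
-- collect the emitted pieces in a list, join at the end ( ''.join → PySem.Str.join "" ).
def hmrRuns : List Char → String → List String
  | [], _pending => []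
  | c :: rest, pending =>
    if h : (c == '-') = true then
      hmrRuns (List.dropWhile (· == '-') (c :: rest))
        (if (List.takeWhile (· == '-') (c :: rest)).length % 2 = 1 then "-" else "")
    else
      (pending ++ String.ofList (List.takeWhile (· != '-') (c :: rest))) ::
        hmrRuns (List.dropWhile (· != '-') (c :: rest)) ""
  termination_by l _ => l.length
  decreasing_by
  · rw [List.dropWhile_cons_of_pos (p := fun x => x == '-') (l := rest) h]
    exact Nat.lt_succ_of_le (List.length_dropWhile_le (· == '-') rest)
  · rw [List.dropWhile_cons_of_pos (p := fun x => x != '-') (l := rest) (by simpa using h)]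
    exact Nat.lt_succ_of_le (List.length_dropWhile_le (· != '-') rest)

def handleMinusRepeats_alt (expr : String) : String :=
  PySem.Str.join "" (hmrRuns expr.toList "")

-- ===== PRECONDITION & SPEC =====
def Spec_handleMinusRepeats (expr : String) (out : String) : Prop := out = handleMinusRepeats_alt expr
instance (expr : String) (out : String) : Decidable (Spec_handleMinusRepeats expr out) := by unfold Spec_handleMinusRepeats; infer_instance

-- ===== CLAIM (what is proved, stated in full; the proofs are below) =====
def Claim_equal_handleMinusRepeats : Prop := ∀ (expr : String), Dom_handleMinusRepeats expr → Spec_handleMinusRepeats expr (handleMinusRepeats expr)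

-- ===== LEMMAS AND PROOFS =====

-- A's loop as a structural recursion (same step function, same state).
def hmrA : List Char → String → String → String
  | [], _mult, acc => acc
  | c :: rest, mult, acc =>
    if c == '-' then hmrA rest (if mult ≠ "-" then "-" else "") acc
    else hmrA rest "" (acc ++ mult ++ String.singleton c)

theorem hmrA_eq_foldl (l : List Char) (mult acc : String) :
    (l.foldl
      (fun (st : String × String) ind =>
        if ind == '-' then
          (if st.1 ≠ "-" then "-" else "", st.2)
        else
          ("", st.2 ++ st.1 ++ String.singleton ind))
      (mult, acc)).2 = hmrA l mult acc := by
  induction l generalizing mult acc with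
  | nil => rfl
  | cons c rest ih =>
    by_cases h : c = '-' <;> simp [hmrA, h, ← ih]

-- the value of mult after n '-' characters
def hmrTog : Nat → String → String
  | 0, m => m
  | n + 1, m => hmrTog n (if m ≠ "-" then "-" else "")

theorem hmrTog_parity (n : Nat) :
    hmrTog n "" = (if n % 2 = 1 then "-" else "") ∧
    hmrTog n "-" = (if n % 2 = 1 then "" else "-") := by
  induction n with
  | zero => simp [hmrTog]
  | succ n ih =>
    obtain ⟨h1, h2⟩ := ih
    have e1 : (if ("" : String) ≠ "-" then "-" else "") = "-" := by decide
    have e2 : (if ("-" : String) ≠ "-" then "-" else "") = "" := by decide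
    constructor
    · show hmrTog n (if ("" : String) ≠ "-" then "-" else "") = _
      rw [e1, h2]
      rcases Nat.mod_two_eq_zero_or_one n with h | h
      · rw [if_neg (by omega), if_pos (by omega)]
      · rw [if_pos (by omega), if_neg (by omega)]
    · show hmrTog n (if ("-" : String) ≠ "-" then "-" else "") = _
      rw [e2, h1]
      rcases Nat.mod_two_eq_zero_or_one n with h | h
      · rw [if_neg (by omega), if_pos (by omega)]
      · rw [if_pos (by omega), if_neg (by omega)]

-- A consumes a maximal minus-run by toggling mult once per character.
theorem hmrA_drop_minus (l : List Char) (mult acc : String) :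
    hmrA l mult acc =
      hmrA (List.dropWhile (· == '-') l)
        (hmrTog (List.takeWhile (· == '-') l).length mult) acc := by
  induction l generalizing mult with
  | nil => simp [hmrTog]
  | cons c rest ih =>
    by_cases h : (c == '-') = true
    · rw [List.dropWhile_cons_of_pos (p := fun x => x == '-') (l := rest) h,
        List.takeWhile_cons_of_pos (p := fun x => x == '-') (l := rest) h]
      simp only [hmrA, h, if_pos]
      rw [ih]
      rfl
    · rw [List.dropWhile_cons_of_neg (p := fun x => x == '-') (l := rest) h,
        List.takeWhile_cons_of_neg (p := fun x => x == '-') (l := rest) h]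
      simp [hmrTog]

-- one non-minus step of A
theorem hmrA_cons_non (c : Char) (rest : List Char) (mult acc : String)
    (hc : (c == '-') = false) :
    hmrA (c :: rest) mult acc = hmrA rest "" (acc ++ mult ++ String.singleton c) := by
  simp [hmrA, hc]

-- A consumes a maximal non-minus run by appending mult once, then each character.
theorem hmrA_drop_non (rest : List Char) (c : Char) (mult acc : String)
    (hc : (c == '-') = false) :
    hmrA (c :: rest) mult acc =
      hmrA (List.dropWhile (· != '-') (c :: rest)) ""
        (acc ++ mult ++ String.ofList (List.takeWhile (· != '-') (c :: rest))) := by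
  have hcne : (c != '-') = true := by simp [bne, hc]
  induction rest generalizing c mult acc with
  | nil =>
    rw [hmrA_cons_non c [] mult acc hc,
      List.dropWhile_cons_of_pos (p := fun x => x != '-') (l := []) hcne,
      List.takeWhile_cons_of_pos (p := fun x => x != '-') (l := []) hcne]
    simp [hmrA, String.singleton_eq_ofList]
  | cons e rest' ih =>
    rw [List.dropWhile_cons_of_pos (p := fun x => x != '-') (l := e :: rest') hcne,
      List.takeWhile_cons_of_pos (p := fun x => x != '-') (l := e :: rest') hcne,
      hmrA_cons_non c (e :: rest') mult acc hc]
    by_cases he : (e == '-') = true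
    · have hene : (e != '-') = false := by simp [bne, he]
      rw [List.dropWhile_cons_of_neg (p := fun x => x != '-') (l := rest') (by simp [hene]),
        List.takeWhile_cons_of_neg (p := fun x => x != '-') (l := rest') (by simp [hene])]
      rw [String.singleton_eq_ofList]
    · rw [ih e "" (acc ++ mult ++ String.singleton c) (by simpa using he) (by simp [bne]; simpa using he)]
      congr 1
      apply String.toList_inj.mp
      simp

theorem hmr_head_dropWhile {p : Char → Bool} {l : List Char} {a : Char}
    (h : (List.dropWhile p l).head? = some a) : p a = false := by
  induction l with
  | nil => simp at h
  | cons c rest ih =>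
    by_cases hc : p c = true
    · rw [List.dropWhile_cons_of_pos hc] at h; exact ih h
    · rw [List.dropWhile_cons_of_neg hc] at h
      simp at h
      subst h
      simpa using hc

theorem hmr_join_cons (s : String) (l : List String) :
    PySem.Str.join "" (s :: l) = s ++ PySem.Str.join "" l := by
  apply String.toList_inj.mp
  simp [PySem.Str.toList_join, PySem.Chars.join, List.intercalate]
  cases l <;> simp

-- Main invariant: starting with a pending sign in {"", "-"} (empty whenever a minus-run
-- is next), A's state machine produces acc ++ join of B's pieces.
theorem hmr_main (l : List Char) (pending acc : String)
    (hp : pending = "" ∨ pending = "-")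
    (hh : l.head? = some '-' → pending = "") :
    hmrA l pending acc = acc ++ PySem.Str.join "" (hmrRuns l pending) := by
  induction l, pending using hmrRuns.induct generalizing acc with
  | case1 pending =>
    have : PySem.Str.join "" ([] : List String) = "" := by decide
    simp [hmrRuns, hmrA, this]
  | case2 c rest pending hc ih =>
    obtain rfl : pending = "" := hh (by simpa using hc)
    rw [hmrA_drop_minus]
    rw [(hmrTog_parity _).1]
    unfold hmrRuns
    simp only [hc]
    exact ih acc (by split <;> simp) (fun hcontra => by
      have := hmr_head_dropWhile hcontra
      simp at this)
  | case3 c rest pending hc ih =>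
    rw [hmrA_drop_non rest c _ _ (by simpa using hc)]
    unfold hmrRuns
    rw [dif_neg (by simpa using hc)]
    rw [ih (acc ++ pending ++ String.ofList (List.takeWhile (· != '-') (c :: rest)))
      (Or.inl rfl) (fun _ => rfl)]
    rw [hmr_join_cons]
    simp [String.append_assoc]

-- ===== VERDICT (by name: the statement is the Claim_ definition above) =====
theorem handleMinusRepeats_spec : Claim_equal_handleMinusRepeats := by
  intro expr _
  unfold Spec_handleMinusRepeats handleMinusRepeats handleMinusRepeats_alt
  rw [hmrA_eq_foldl]
  rw [hmr_main expr.toList "" "" (Or.inl rfl) (fun _ => rfl)]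
  simp
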